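-- pv_equiv track=rewrite | github.com/avsirbu82/FRITZ-Box-20-digits-password-generator | FritzWLGenerator.py | no_more_than_three_repeating
-- ===== SOURCE A (Python) =====
-- def no_more_than_three_repeating(sequence):
--     count = 1  # Counter for consecutive repeating characters
--     for i in range(1, len(sequence)):
--         if sequence[i] == sequence[i - 1]:
--             count += 1
--             if count > 3:
--                 return False
--         else:
--             count = 1  # Reset counter if characters are different
--     return True
-- ===== SOURCE B (Python) =====
-- def no_more_than_three_repeating(sequence):
--     # Build the list of consecutive runs, then test that every run
--     # has length at most 3.
--     runs = []  # list of (char, run_length) in order of appearance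
--     for ch in sequence:
--         if runs and runs[-1][0] == ch:
--             runs[-1] = (ch, runs[-1][1] + 1)
--         else:
--             runs.append((ch, 1))
--     return all(n <= 3 for _, n in runs)
-- ===== Notes on version B (the rewrite author's own statement) =====
-- stated objective: alternative
-- what changed: Replaces the running-counter scan with early return by a build-consecutive-runs pass followed by an all(run length <= 3) test.
import Mathlib
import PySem

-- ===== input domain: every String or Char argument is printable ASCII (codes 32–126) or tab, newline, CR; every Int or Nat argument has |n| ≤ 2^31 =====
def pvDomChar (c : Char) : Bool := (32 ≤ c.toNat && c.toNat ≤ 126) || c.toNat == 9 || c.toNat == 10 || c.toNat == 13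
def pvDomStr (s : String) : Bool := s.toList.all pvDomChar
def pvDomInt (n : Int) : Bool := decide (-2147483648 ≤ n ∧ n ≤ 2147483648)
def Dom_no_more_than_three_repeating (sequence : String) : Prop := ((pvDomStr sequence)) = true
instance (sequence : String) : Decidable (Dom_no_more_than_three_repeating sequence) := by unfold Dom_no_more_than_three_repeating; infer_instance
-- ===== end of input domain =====

-- B builds the list of consecutive runs and then checks all run lengths ≤ 3,
-- instead of A's running counter with early return; alternative decomposition, same cost.

-- ===== PORT A =====
-- A compares sequence[i] with sequence[i-1] for i = 1 .. len-1, keeping a counter;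
-- pairwise recursion over (previous char, rest of the chars) with the same counter.
def nmtrLoop : List Char → Char → Int → Bool
  | [], _, _ => true
  | c :: rest, prev, count =>
    if c = prev then
      if count + 1 > 3 then false
      else nmtrLoop rest c (count + 1)
    else nmtrLoop rest c 1

def no_more_than_three_repeating (sequence : String) : Bool :=
  match sequence.toList with
  | [] => true
  | c :: rest => nmtrLoop rest c 1

-- ===== PORT B =====
-- one step of B's loop: extend the current run or start a new run.  The runs
-- list is kept most-recent-first (the functional transcription of Python's
-- append-at-end / update runs[-1]) and is reversed before the final test.
def nmtrStep (runs : List (Char × Int)) (ch : Char) : List (Char × Int) :=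
  match runs with
  | (d, n) :: t => if d = ch then (ch, n + 1) :: t else (ch, 1) :: (d, n) :: t
  | [] => [(ch, 1)]

def no_more_than_three_repeating_alt (sequence : String) : Bool :=
  ((sequence.toList.foldl nmtrStep []).reverse).all (fun p => p.2 ≤ 3)

-- ===== PRECONDITION & SPEC =====
def Spec_no_more_than_three_repeating (sequence : String) (out : Bool) : Prop := out = no_more_than_three_repeating_alt sequence
instance (sequence : String) (out : Bool) : Decidable (Spec_no_more_than_three_repeating sequence out) := by unfold Spec_no_more_than_three_repeating; infer_instance

-- ===== CLAIM (what is proved, stated in full; the proofs are below) =====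
def Claim_equal_no_more_than_three_repeating : Prop := ∀ (sequence : String), Dom_no_more_than_three_repeating sequence → Spec_no_more_than_three_repeating sequence (no_more_than_three_repeating sequence)

-- ===== LEMMAS AND PROOFS =====

-- Once some run in the accumulator already exceeds 3, the final test is false:
-- nmtrStep only increments the front run or prepends, so a bad run never disappears.
lemma nmtr_bad_stays (l : List Char) : ∀ acc : List (Char × Int),
    (∃ p ∈ acc, (3:Int) < p.2) →
    (List.foldl nmtrStep acc l).all (fun p => p.2 ≤ 3) = false := by
  induction l with
  | nil =>
    rintro acc ⟨p, hp, h3⟩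
    simp only [List.foldl_nil, List.all_eq_false]
    refine ⟨p, hp, ?_⟩
    simp
    omega
  | cons c rest ih =>
    rintro acc ⟨p, hp, h3⟩
    rw [List.foldl_cons]
    apply ih
    cases acc with
    | nil => cases hp
    | cons q t =>
      obtain ⟨d, n⟩ := q
      by_cases hdc : d = c
      · simp only [nmtrStep, if_pos hdc]
        rcases List.mem_cons.mp hp with he | ht
        · subst he
          exact ⟨(c, n + 1), by simp, by simp at h3 ⊢; omega⟩
        · exact ⟨p, List.mem_cons_of_mem _ ht, h3⟩
      · simp only [nmtrStep, if_neg hdc]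
        exact ⟨p, List.mem_cons_of_mem _ hp, h3⟩

-- Main invariant: A's loop state (prev, count) is exactly B's most recent run.
lemma nmtr_key (l : List Char) : ∀ (prev : Char) (count : Int) (acc : List (Char × Int)),
    1 ≤ count → count ≤ 3 → (∀ p ∈ acc, p.2 ≤ (3:Int)) →
    nmtrLoop l prev count
      = (List.foldl nmtrStep ((prev, count) :: acc) l).all (fun p => p.2 ≤ 3) := by
  induction l with
  | nil =>
    intro prev count acc h1 h3 hacc
    simp only [nmtrLoop, List.foldl_nil, List.all_cons]
    have : decide (count ≤ (3:Int)) = true := by simp; omega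
    simp [this]
    rintro a b hp
    exact hacc (a, b) hp
  | cons c rest ih =>
    intro prev count acc h1 h3 hacc
    rw [List.foldl_cons]
    by_cases hcp : c = prev
    · subst hcp
      have hstep : nmtrStep ((c, count) :: acc) c = (c, count + 1) :: acc := by
        simp [nmtrStep]
      rw [hstep]
      by_cases hgt : count + 1 > 3
      · have hL : nmtrLoop (c :: rest) c count = false := by
          simp [nmtrLoop, hgt]
        rw [hL, nmtr_bad_stays rest _ ⟨(c, count + 1), by simp, by omega⟩]
      · have hL : nmtrLoop (c :: rest) c count = nmtrLoop rest c (count + 1) := by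
          simp [nmtrLoop, hgt]
        rw [hL]
        exact ih c (count + 1) acc (by omega) (by omega) hacc
    · have hne : ¬ prev = c := fun h => hcp h.symm
      have hstep : nmtrStep ((prev, count) :: acc) c = (c, 1) :: (prev, count) :: acc := by
        simp only [nmtrStep, if_neg hne]
      have hL : nmtrLoop (c :: rest) prev count = nmtrLoop rest c 1 := by
        simp [nmtrLoop, hcp]
      rw [hstep, hL]
      exact ih c 1 ((prev, count) :: acc) le_rfl (by norm_num)
        (by intro p hp
            rcases List.mem_cons.mp hp with h | h
            · subst h; exact h3
            · exact hacc p h)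

-- ===== VERDICT (by name: the statement is the Claim_ definition above) =====
theorem no_more_than_three_repeating_spec : Claim_equal_no_more_than_three_repeating := by
  intro sequence _
  unfold Spec_no_more_than_three_repeating no_more_than_three_repeating no_more_than_three_repeating_alt
  rw [List.all_reverse]
  match h : sequence.toList with
  | [] => simp
  | c :: rest =>
    simp only [List.foldl_cons, nmtrStep]
    exact nmtr_key rest c 1 [] le_rfl (by norm_num) (by simp)
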